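-- pv_equiv track=rewrite | github.com/atorras1618/PerMaViss | permaviss/old_code/sparseGauss.py | sum_sparse
-- ===== SOURCE A (Python) =====
-- def sum_sparse(a, b):
--     """Adds two sparse vectors and returns the result ordered"""
--     s = []  #initialize solution list
--     for n in a:
--         if b.count(n)==0:
--             s.append(n)
--     for n in b:
--         if a.count(n)==0:
--             s.append(n)
--     return sorted(s)
-- ===== SOURCE B (Python) =====
-- def sum_sparse(a, b):
--     """Adds two sparse vectors and returns the result ordered"""
--     xs, ys = sorted(a), sorted(b)
--     out = []
--     i = j = 0
--     while i < len(xs) and j < len(ys):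
--         if xs[i] < ys[j]:
--             out.append(xs[i]); i += 1
--         elif ys[j] < xs[i]:
--             out.append(ys[j]); j += 1
--         else:
--             v = xs[i]
--             while i < len(xs) and xs[i] == v:
--                 i += 1
--             while j < len(ys) and ys[j] == v:
--                 j += 1
--     out.extend(xs[i:])
--     out.extend(ys[j:])
--     return out
-- ===== Notes on version B (the rewrite author's own statement) =====
-- stated objective: faster
-- what changed: Replaces A's two quadratic passes (each element tested with a full count() scan of the other list) plus a final sort by sorting both inputs once and computing the symmetric difference with a single two-pointer merge that skips whole equal runs on both sides, emitting the result already in order.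
import Mathlib
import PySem

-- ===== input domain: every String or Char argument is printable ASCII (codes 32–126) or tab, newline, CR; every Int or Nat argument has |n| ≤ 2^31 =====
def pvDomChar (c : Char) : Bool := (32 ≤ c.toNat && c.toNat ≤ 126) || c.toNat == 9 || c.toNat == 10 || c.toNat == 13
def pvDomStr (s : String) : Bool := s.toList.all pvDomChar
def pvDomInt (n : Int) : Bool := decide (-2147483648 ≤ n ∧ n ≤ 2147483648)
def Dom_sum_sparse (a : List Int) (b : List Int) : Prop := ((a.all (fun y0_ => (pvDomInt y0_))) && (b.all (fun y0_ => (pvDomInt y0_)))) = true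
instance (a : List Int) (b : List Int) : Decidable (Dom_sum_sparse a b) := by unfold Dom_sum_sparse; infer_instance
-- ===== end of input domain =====

-- B replaces A's count-based double scan + final sort by sort-both-then-two-pointer-merge
-- that skips whole equal runs on both sides (objective: faster).

-- ===== PORT A =====
def sum_sparse (a : List Int) (b : List Int) : List Int :=
  let s : List Int := []
  let s := a.foldl (fun s n => if PySem.List.count b n == 0 then s ++ [n] else s) s
  let s := b.foldl (fun s n => if PySem.List.count a n == 0 then s ++ [n] else s) s
  PySem.List.sorted s (fun x => x) false

-- ===== PORT B =====
-- the two-pointer merge of Source B: emit the smaller front; on equal fronts skip the whole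
-- equal run on both sides; when one side is exhausted, the rest of the other is the output
def ssMerge : List Int → List Int → List Int
  | [], ys => ys
  | x :: xs, [] => x :: xs
  | x :: xs, y :: ys =>
    if x < y then x :: ssMerge xs (y :: ys)
    else if y < x then y :: ssMerge (x :: xs) ys
    else ssMerge (xs.dropWhile (fun z => z == x)) (ys.dropWhile (fun z => z == x))
termination_by xs ys => xs.length + ys.length
decreasing_by
  all_goals simp
  have h1 := List.length_dropWhile_le (fun z => z == x) xs
  have h2 := List.length_dropWhile_le (fun z => z == x) ys
  omega

def sum_sparse_alt (a : List Int) (b : List Int) : List Int :=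
  ssMerge (PySem.List.sorted a (fun x => x) false) (PySem.List.sorted b (fun x => x) false)

-- ===== PRECONDITION & SPEC =====
def Spec_sum_sparse (a : List Int) (b : List Int) (out : List Int) : Prop := out = sum_sparse_alt a b
instance (a : List Int) (b : List Int) (out : List Int) : Decidable (Spec_sum_sparse a b out) := by unfold Spec_sum_sparse; infer_instance

-- ===== CLAIM (what is proved, stated in full; the proofs are below) =====
def Claim_equal_sum_sparse : Prop := ∀ (a : List Int) (b : List Int), Dom_sum_sparse a b → Spec_sum_sparse a b (sum_sparse a b)

-- ===== LEMMAS AND PROOFS =====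

theorem ssMerge_cons_cons (x y : Int) (xs ys : List Int) :
    ssMerge (x :: xs) (y :: ys) =
      if x < y then x :: ssMerge xs (y :: ys)
      else if y < x then y :: ssMerge (x :: xs) ys
      else ssMerge (xs.dropWhile (fun z => z == x)) (ys.dropWhile (fun z => z == x)) := by
  rw [ssMerge]

-- elements of ssMerge come from one of its inputs
theorem mem_ssMerge : ∀ (xs ys : List Int) (v : Int), v ∈ ssMerge xs ys → v ∈ xs ∨ v ∈ ys := by
  intro xs ys
  induction xs, ys using ssMerge.induct with
  | case1 ys => intro v h; rw [ssMerge] at h; exact Or.inr h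
  | case2 x xs => intro v h; rw [ssMerge] at h; exact Or.inl h
  | case3 x xs y ys hlt ih =>
    intro v h
    rw [ssMerge_cons_cons, if_pos hlt] at h
    rcases List.mem_cons.mp h with h | h
    · exact Or.inl (by simp [h])
    · rcases ih v h with h' | h'
      · exact Or.inl (List.mem_cons_of_mem _ h')
      · exact Or.inr h'
  | case4 x xs y ys hlt hgt ih =>
    intro v h
    rw [ssMerge_cons_cons, if_neg hlt, if_pos hgt] at h
    rcases List.mem_cons.mp h with h | h
    · exact Or.inr (by simp [h])
    · rcases ih v h with h' | h'
      · exact Or.inl h'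
      · exact Or.inr (List.mem_cons_of_mem _ h')
  | case5 x xs y ys hlt hgt ih =>
    intro v h
    rw [ssMerge_cons_cons, if_neg hlt, if_neg hgt] at h
    rcases ih v h with h' | h'
    · exact Or.inl (List.mem_cons_of_mem _ ((List.dropWhile_sublist _).mem h'))
    · exact Or.inr (List.mem_cons_of_mem _ ((List.dropWhile_sublist _).mem h'))

-- in a sorted list x :: t, everything past the initial run of x's is strictly above x
theorem gt_of_mem_dropWhile_run (x : Int) (t : List Int)
    (hs : (x :: t).Pairwise (· ≤ ·)) (v : Int)
    (hv : v ∈ t.dropWhile (fun z => z == x)) : x < v := by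
  induction t with
  | nil => simp at hv
  | cons a t' ih =>
    rcases List.pairwise_cons.mp hs with ⟨hx, hat⟩
    rcases List.pairwise_cons.mp hat with ⟨ha, ht'⟩
    by_cases hax : a = x
    · subst hax
      rw [List.dropWhile_cons_of_pos (by simp)] at hv
      exact ih (List.pairwise_cons.mpr ⟨fun w hw => le_trans (hx a (by simp)) (ha w hw), ht'⟩) hv
    · rw [List.dropWhile_cons_of_neg (by simp [hax])] at hv
      have hxa : x < a := lt_of_le_of_ne (hx a (by simp)) (Ne.symm hax)
      rcases List.mem_cons.mp hv with rfl | h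
      · exact hxa
      · exact lt_of_lt_of_le hxa (ha v h)

-- for v above the head of a sorted list, membership survives dropping the head's run
theorem mem_run (x v : Int) (t : List Int)
    (hs : (x :: t).Pairwise (· ≤ ·)) (hv : x < v) :
    (v ∈ x :: t) ↔ v ∈ t.dropWhile (fun z => z == x) := by
  constructor
  · intro h
    rcases List.mem_cons.mp h with rfl | h
    · omega
    · conv at h => rw [← List.takeWhile_append_dropWhile (p := fun z => z == x) (l := t)]
      rcases List.mem_append.mp h with h | h
      · have := List.mem_takeWhile_imp h; simp at this; omega
      · exact h
  · intro h
    exact List.mem_cons_of_mem _ ((List.dropWhile_sublist _).mem h)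

-- ssMerge of two sorted lists is sorted
theorem ssMerge_pairwise : ∀ (xs ys : List Int), xs.Pairwise (· ≤ ·) → ys.Pairwise (· ≤ ·) →
    (ssMerge xs ys).Pairwise (· ≤ ·) := by
  intro xs ys
  induction xs, ys using ssMerge.induct with
  | case1 ys => intro _ hy; rw [ssMerge]; exact hy
  | case2 x xs => intro hx _; rw [ssMerge]; exact hx
  | case3 x xs y ys hlt ih =>
    intro hx hy
    rw [ssMerge_cons_cons, if_pos hlt]
    refine List.pairwise_cons.mpr ⟨?_, ih hx.of_cons hy⟩
    intro w hw
    rcases mem_ssMerge _ _ w hw with h | h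
    · exact (List.pairwise_cons.mp hx).1 w h
    · rcases List.mem_cons.mp h with rfl | h
      · exact le_of_lt hlt
      · exact le_trans (le_of_lt hlt) ((List.pairwise_cons.mp hy).1 w h)
  | case4 x xs y ys hlt hgt ih =>
    intro hx hy
    rw [ssMerge_cons_cons, if_neg hlt, if_pos hgt]
    refine List.pairwise_cons.mpr ⟨?_, ih hx hy.of_cons⟩
    intro w hw
    rcases mem_ssMerge _ _ w hw with h | h
    · rcases List.mem_cons.mp h with rfl | h
      · exact le_of_lt hgt
      · exact le_trans (le_of_lt hgt) ((List.pairwise_cons.mp hx).1 w h)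
    · exact (List.pairwise_cons.mp hy).1 w h
  | case5 x xs y ys hlt hgt ih =>
    intro hx hy
    have hxy : x = y := le_antisymm (le_of_not_gt hgt) (le_of_not_gt hlt)
    subst hxy
    rw [ssMerge_cons_cons, if_neg hlt, if_neg hgt]
    exact ih (hx.of_cons.sublist (List.dropWhile_sublist _))
             (hy.of_cons.sublist (List.dropWhile_sublist _))

-- ssMerge of two sorted lists is a rearrangement of the two "not in the other" filters
theorem ssMerge_perm : ∀ (xs ys : List Int), xs.Pairwise (· ≤ ·) → ys.Pairwise (· ≤ ·) →
    (ssMerge xs ys).Perm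
      (xs.filter (fun v => !(ys.contains v)) ++ ys.filter (fun v => !(xs.contains v))) := by
  intro xs ys
  induction xs, ys using ssMerge.induct with
  | case1 ys => intro _ _; rw [ssMerge]; simp
  | case2 x xs => intro _ _; rw [ssMerge]; simp
  | case3 x xs y ys hlt ih =>
    intro hx hy
    rw [ssMerge_cons_cons, if_pos hlt]
    have hbig : ∀ w ∈ y :: ys, x < w := by
      intro w hw
      rcases List.mem_cons.mp hw with rfl | hw
      · exact hlt
      · exact lt_of_lt_of_le hlt ((List.pairwise_cons.mp hy).1 w hw)
    have hxmem : x ∉ y :: ys := fun h => absurd (hbig x h) (lt_irrefl x)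
    have hfilQ : (y :: ys).filter (fun v => !((x :: xs).contains v))
        = (y :: ys).filter (fun v => !(xs.contains v)) := by
      refine List.filter_congr ?_
      intro w hw
      have hne : w ≠ x := fun h => absurd (h ▸ hbig w hw) (lt_irrefl x)
      simp [hne]
    have hsplit : (x :: xs).filter (fun v => !((y :: ys).contains v))
        = x :: xs.filter (fun v => !((y :: ys).contains v)) :=
      List.filter_cons_of_pos (by simpa using hxmem)
    rw [hsplit, hfilQ]
    exact (ih hx.of_cons hy).cons x
  | case4 x xs y ys hlt hgt ih =>
    intro hx hy
    rw [ssMerge_cons_cons, if_neg hlt, if_pos hgt]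
    have hbig : ∀ w ∈ x :: xs, y < w := by
      intro w hw
      rcases List.mem_cons.mp hw with rfl | hw
      · exact hgt
      · exact lt_of_lt_of_le hgt ((List.pairwise_cons.mp hx).1 w hw)
    have hymem : y ∉ x :: xs := fun h => absurd (hbig y h) (lt_irrefl y)
    have hfilP : (x :: xs).filter (fun v => !((y :: ys).contains v))
        = (x :: xs).filter (fun v => !(ys.contains v)) := by
      refine List.filter_congr ?_
      intro w hw
      have hne : w ≠ y := fun h => absurd (h ▸ hbig w hw) (lt_irrefl y)
      simp [hne]
    have hsplit : (y :: ys).filter (fun v => !((x :: xs).contains v))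
        = y :: ys.filter (fun v => !((x :: xs).contains v)) :=
      List.filter_cons_of_pos (by simpa using hymem)
    rw [hfilP, hsplit]
    exact ((ih hx hy.of_cons).cons y).trans List.perm_middle.symm
  | case5 x xs y ys hlt hgt ih =>
    intro hx hy
    have hxy : x = y := le_antisymm (le_of_not_gt hgt) (le_of_not_gt hlt)
    subst hxy
    rw [ssMerge_cons_cons, if_neg hlt, if_neg hgt]
    have hxs' : (xs.dropWhile (fun z => z == x)).Pairwise (· ≤ ·) :=
      hx.of_cons.sublist (List.dropWhile_sublist _)
    have hys' : (ys.dropWhile (fun z => z == x)).Pairwise (· ≤ ·) :=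
      hy.of_cons.sublist (List.dropWhile_sublist _)
    have hfilL : (x :: xs).filter (fun v => !((x :: ys).contains v))
        = (xs.dropWhile (fun z => z == x)).filter
            (fun v => !((ys.dropWhile (fun z => z == x)).contains v)) := by
      rw [List.filter_cons_of_neg (by simp)]
      conv_lhs => rw [← List.takeWhile_append_dropWhile (p := fun z => z == x) (l := xs)]
      rw [List.filter_append]
      have ht : (xs.takeWhile (fun z => z == x)).filter
          (fun v => !((x :: ys).contains v)) = [] := by
        rw [List.filter_eq_nil_iff]
        intro w hw
        have := List.mem_takeWhile_imp hw
        simp at this ⊢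
        exact fun hne => absurd this hne
      rw [ht, List.nil_append]
      refine List.filter_congr ?_
      intro w hw
      have hwx : x < w := gt_of_mem_dropWhile_run x xs hx w hw
      simp only [List.contains_eq_mem]
      exact congrArg (fun t => !t) (decide_eq_decide.mpr (mem_run x w ys hy hwx))
    have hfilR : (x :: ys).filter (fun v => !((x :: xs).contains v))
        = (ys.dropWhile (fun z => z == x)).filter
            (fun v => !((xs.dropWhile (fun z => z == x)).contains v)) := by
      rw [List.filter_cons_of_neg (by simp)]
      conv_lhs => rw [← List.takeWhile_append_dropWhile (p := fun z => z == x) (l := ys)]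
      rw [List.filter_append]
      have ht : (ys.takeWhile (fun z => z == x)).filter
          (fun v => !((x :: xs).contains v)) = [] := by
        rw [List.filter_eq_nil_iff]
        intro w hw
        have := List.mem_takeWhile_imp hw
        simp at this ⊢
        exact fun hne => absurd this hne
      rw [ht, List.nil_append]
      refine List.filter_congr ?_
      intro w hw
      have hwx : x < w := gt_of_mem_dropWhile_run x ys hy w hw
      simp only [List.contains_eq_mem]
      exact congrArg (fun t => !t) (decide_eq_decide.mpr (mem_run x w xs hx hwx))
    rw [hfilL, hfilR]
    exact ih hxs' hys'

-- A's two append loops build exactly the two filters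
theorem sum_sparse_eq_sorted_filters (a b : List Int) :
    sum_sparse a b = PySem.List.sorted
      (a.filter (fun v => !(b.contains v)) ++ b.filter (fun v => !(a.contains v)))
      (fun x => x) false := by
  simp only [sum_sparse]
  have h1 : ∀ (l m : List Int) (acc : List Int),
      l.foldl (fun s n => if PySem.List.count m n == 0 then s ++ [n] else s) acc
        = acc ++ l.filter (fun v => !(m.contains v)) := by
    intro l m acc
    have := PySem.List.foldl_append_if (fun n => PySem.List.count m n == 0) (fun n => n) l acc
    simp only [List.map_id'] at this
    rw [this]
    congr 1
    refine List.filter_congr ?_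
    intro w _
    by_cases hm : w ∈ m
    · simp [PySem.List.count_eq, List.count_eq_zero, List.contains_eq_mem, hm]
    · simp [PySem.List.count_eq, List.count_eq_zero, List.contains_eq_mem, hm]
  rw [h1, h1, List.nil_append]

-- ===== VERDICT (by name: the statement is the Claim_ definition above) =====
theorem sum_sparse_spec : Claim_equal_sum_sparse := by
  intro a b _
  unfold Spec_sum_sparse sum_sparse_alt
  rw [sum_sparse_eq_sorted_filters]
  set sa := PySem.List.sorted a (fun x => x) false with hsa
  set sb := PySem.List.sorted b (fun x => x) false with hsb
  have hpa : sa.Pairwise (· ≤ ·) := PySem.List.sorted_pairwise a (fun x => x)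
  have hpb : sb.Pairwise (· ≤ ·) := PySem.List.sorted_pairwise b (fun x => x)
  refine PySem.List.sorted_id_eq_of_perm_of_pairwise _ _ ?_ (ssMerge_pairwise sa sb hpa hpb)
  have hperm := ssMerge_perm sa sb hpa hpb
  have hca : ∀ v : Int, sa.contains v = a.contains v := by
    intro v; simp [List.contains_eq_mem, hsa, PySem.List.mem_sorted]
  have hcb : ∀ v : Int, sb.contains v = b.contains v := by
    intro v; simp [List.contains_eq_mem, hsb, PySem.List.mem_sorted]
  have hfa : sa.filter (fun v => !(sb.contains v)) = sa.filter (fun v => !(b.contains v)) := by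
    refine List.filter_congr ?_; intro w _; rw [hcb]
  have hfb : sb.filter (fun v => !(sa.contains v)) = sb.filter (fun v => !(a.contains v)) := by
    refine List.filter_congr ?_; intro w _; rw [hca]
  rw [hfa, hfb] at hperm
  refine hperm.trans (List.Perm.append ?_ ?_)
  · exact (PySem.List.sorted_perm a (fun x => x) false).filter _
  · exact (PySem.List.sorted_perm b (fun x => x) false).filter _
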